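-- pv_equiv track=rewrite | github.com/abulte/ecospheres-org-ref | extract.py | find_top_level_alt_parents_by_id
-- ===== SOURCE A (Python) =====
-- ID_MTE = "05f90b6a-e3d9-4a41-a919-2e2f2d77e517"
--
-- ID_GVT = "622a21da-ff27-4f5a-ae74-133aa03d905f"
--
-- def find_top_level_parent_by_id(_id: str, graph: dict):
--     # sanity check, only one parent by id in "Service Fils" graph
--     parents = [node for node, children in graph.items() if _id in children]
--     assert len(parents) <= 1, "Multiple parents detected"
--
--     parent = next(iter(parents), None)
--     # no more parent, top level found
--     if parent is None or parent == ID_GVT or parent == ID_MTE: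
--         return _id
--     else:
--         return find_top_level_parent_by_id(parent, graph)
--
-- def find_top_level_alt_parents_by_id(
--         _id: str, alt_graph: dict, sf_graph: dict
-- ):
--     parents = [
--         node for node, children in alt_graph.items()
--         if _id in children and node != ID_MTE
--     ]
--     return [
--         find_top_level_parent_by_id(p, sf_graph) for p in parents
--     ]
-- ===== SOURCE B (Python) =====
-- ID_MTE = "05f90b6a-e3d9-4a41-a919-2e2f2d77e517"
--
-- ID_GVT = "622a21da-ff27-4f5a-ae74-133aa03d905f"
--
--
-- def find_top_level_alt_parents_by_id(_id, alt_graph, sf_graph):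
--     # Build a child -> parents index of sf_graph once; the upward walk is then
--     # an iterative loop with O(1) lookups instead of a fresh scan per step.
--     index = {}
--     for node, children in sf_graph.items():
--         for c in dict.fromkeys(children):
--             index.setdefault(c, []).append(node)
--
--     def top_level(current):
--         while True:
--             parents = index.get(current, [])
--             assert len(parents) <= 1, "Multiple parents detected"
--             if not parents or parents[0] == ID_GVT or parents[0] == ID_MTE:
--                 return current
--             current = parents[0]
--
--     return [
--         top_level(node) for node, children in alt_graph.items()
--         if _id in children and node != ID_MTE
--     ]
-- ===== Notes on version B (the rewrite author's own statement) =====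
-- stated objective: alternative
-- what changed: Replaces A's recursive helper, which rescans the whole sf_graph for parents at every step of every walk, by a child->parents index built once followed by an iterative while-loop walk doing one dict lookup per step (same per-step assert).
import Mathlib
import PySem

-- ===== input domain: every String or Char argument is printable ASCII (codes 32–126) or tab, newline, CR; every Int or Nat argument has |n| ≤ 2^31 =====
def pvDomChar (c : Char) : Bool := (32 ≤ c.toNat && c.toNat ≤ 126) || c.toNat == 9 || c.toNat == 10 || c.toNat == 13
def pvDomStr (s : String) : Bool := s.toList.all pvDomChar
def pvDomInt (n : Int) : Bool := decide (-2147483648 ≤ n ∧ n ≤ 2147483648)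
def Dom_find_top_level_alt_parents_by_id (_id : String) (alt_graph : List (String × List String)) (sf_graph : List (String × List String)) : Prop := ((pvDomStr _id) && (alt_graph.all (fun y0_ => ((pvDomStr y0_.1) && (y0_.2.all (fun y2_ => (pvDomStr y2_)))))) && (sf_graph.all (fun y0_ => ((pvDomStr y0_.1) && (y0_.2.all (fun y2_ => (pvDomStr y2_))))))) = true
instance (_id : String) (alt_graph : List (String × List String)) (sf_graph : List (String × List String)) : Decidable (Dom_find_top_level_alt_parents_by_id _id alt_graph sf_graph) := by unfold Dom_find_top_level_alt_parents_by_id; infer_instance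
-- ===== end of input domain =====

-- B replaces A's recursive helper (one full scan of sf_graph per step) by a child->parents
-- index built once plus an iterative upward walk: a different decomposition of the same task.

def ID_MTE : String := "05f90b6a-e3d9-4a41-a919-2e2f2d77e517"

def ID_GVT : String := "622a21da-ff27-4f5a-ae74-133aa03d905f"

-- ===== PORT A =====
-- Recursion carries a fuel counter only to be structurally terminating: whenever the
-- Python recursion returns, its depth is at most the number of keys of the graph, so fuel
-- sf_graph.length + 1 is never exhausted on inputs where the Python returns.
def find_top_level_parent_by_id (fuel : Nat) (_id : String) (graph : List (String × List String)) : String :=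
  match fuel with
  | 0 => _id  -- fuel guard only; not reached on inputs where the Python returns
  | fuel + 1 =>
    let parents := (graph.filter (fun kv => decide (_id ∈ kv.2))).map Prod.fst
    -- Python: assert len(parents) <= 1 — raises AssertionError when violated (the ports proceed; both walks see the same list)
    match parents with
    | [] => _id                                   -- parent is None
    | parent :: _ =>                              -- parent = next(iter(parents), None)
      if parent = ID_GVT ∨ parent = ID_MTE then _id
      else find_top_level_parent_by_id fuel parent graph

def find_top_level_alt_parents_by_id (_id : String) (alt_graph : List (String × List String)) (sf_graph : List (String × List String)) : List String :=
  let parents := (alt_graph.filter (fun kv => decide (_id ∈ kv.2) && decide (kv.1 ≠ ID_MTE))).map Prod.fst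
  parents.map (fun p => find_top_level_parent_by_id (sf_graph.length + 1) p sf_graph)

-- ===== PORT B =====
-- index = {}; for node, children in sf_graph.items(): for c in dict.fromkeys(children): index.setdefault(c, []).append(node)
def pvBuildIndex (sf_graph : List (String × List String)) : PySem.Dict String (List String) :=
  sf_graph.foldl
    (fun d kv => (PySem.List.dedup kv.2).foldl (fun d c => d.modify c [] (· ++ [kv.1])) d)
    PySem.Dict.empty

-- the iterative `while True` walk; fuel bounds the loop's trip count
def pvTopLevel (fuel : Nat) (index : PySem.Dict String (List String)) (current : String) : String :=
  match fuel with
  | 0 => current  -- fuel guard only; not reached on inputs where the Python returns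
  | fuel + 1 =>
    let parents := index.getD current []
    -- Python: assert len(parents) <= 1 — raises AssertionError when violated (the ports proceed; both walks see the same list)
    match parents with
    | [] => current
    | p :: _ =>
      if p = ID_GVT ∨ p = ID_MTE then current
      else pvTopLevel fuel index p

def find_top_level_alt_parents_by_id_alt (_id : String) (alt_graph : List (String × List String)) (sf_graph : List (String × List String)) : List String :=
  let index := pvBuildIndex sf_graph
  (alt_graph.filter (fun kv => decide (_id ∈ kv.2) && decide (kv.1 ≠ ID_MTE))).map
    (fun kv => pvTopLevel (sf_graph.length + 1) index kv.1)

-- ===== PRECONDITION & SPEC =====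
def Spec_find_top_level_alt_parents_by_id (_id : String) (alt_graph : List (String × List String)) (sf_graph : List (String × List String)) (out : List String) : Prop := out = find_top_level_alt_parents_by_id_alt _id alt_graph sf_graph
instance (_id : String) (alt_graph : List (String × List String)) (sf_graph : List (String × List String)) (out : List String) : Decidable (Spec_find_top_level_alt_parents_by_id _id alt_graph sf_graph out) := by unfold Spec_find_top_level_alt_parents_by_id; infer_instance

-- ===== CLAIM (what is proved, stated in full; the proofs are below) =====
def Claim_equal_find_top_level_alt_parents_by_id : Prop := ∀ (_id : String) (alt_graph : List (String × List String)) (sf_graph : List (String × List String)), Dom_find_top_level_alt_parents_by_id _id alt_graph sf_graph → Spec_find_top_level_alt_parents_by_id _id alt_graph sf_graph (find_top_level_alt_parents_by_id _id alt_graph sf_graph)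

-- ===== LEMMAS AND PROOFS =====

-- the inner `for c in dict.fromkeys(children)` loop appends node to exactly the buckets of children's elements
theorem pv_modfold (l : List String) (d : PySem.Dict String (List String)) (node c : String)
    (hnd : l.Nodup) :
    (l.foldl (fun d c => d.modify c [] (· ++ [node])) d).getD c []
      = d.getD c [] ++ (if c ∈ l then [node] else []) := by
  induction l generalizing d with
  | nil => simp
  | cons a l ih =>
    rcases List.nodup_cons.mp hnd with ⟨ha, hl⟩
    simp only [List.foldl_cons]
    rw [ih _ hl]
    rw [PySem.Dict.getD_modify]
    by_cases hca : c = a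
    · subst hca
      simp [ha]
    · simp [hca, List.mem_cons]

-- the whole index-building loop: bucket of c = parents of c in sf_graph, in order
theorem pv_index_fold (g : List (String × List String)) (d : PySem.Dict String (List String)) (c : String) :
    (g.foldl (fun d kv => (PySem.List.dedup kv.2).foldl (fun d c => d.modify c [] (· ++ [kv.1])) d) d).getD c []
      = d.getD c [] ++ (g.filter (fun kv => decide (c ∈ kv.2))).map Prod.fst := by
  induction g generalizing d with
  | nil => simp
  | cons kv g ih =>
    simp only [List.foldl_cons]
    rw [ih]
    rw [pv_modfold _ _ _ _ (PySem.List.nodup_dedup kv.2)]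
    by_cases hc : c ∈ kv.2
    · simp [hc]
    · simp [hc]

theorem pv_index_getD (sf_graph : List (String × List String)) (c : String) :
    (pvBuildIndex sf_graph).getD c []
      = (sf_graph.filter (fun kv => decide (c ∈ kv.2))).map Prod.fst := by
  unfold pvBuildIndex
  rw [pv_index_fold]
  simp

-- with equal fuel, the recursive walk of A and the iterative walk of B coincide
theorem pv_walk_eq (fuel : Nat) (graph : List (String × List String)) (cur : String) :
    find_top_level_parent_by_id fuel cur graph
      = pvTopLevel fuel (pvBuildIndex graph) cur := by
  induction fuel generalizing cur with
  | zero => rfl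
  | succ fuel ih =>
    rw [find_top_level_parent_by_id, pvTopLevel, pv_index_getD]
    cases hp : (graph.filter (fun kv => decide (cur ∈ kv.2))).map Prod.fst with
    | nil => rfl
    | cons p rest =>
      by_cases h : p = ID_GVT ∨ p = ID_MTE
      · simp [h]
      · simp [h, ih]

-- ===== VERDICT (by name: the statement is the Claim_ definition above) =====
theorem find_top_level_alt_parents_by_id_spec : Claim_equal_find_top_level_alt_parents_by_id := by
  intro _id alt_graph sf_graph _
  unfold Spec_find_top_level_alt_parents_by_id
  unfold find_top_level_alt_parents_by_id find_top_level_alt_parents_by_id_alt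
  simp only [List.map_map]
  exact List.map_congr_left (fun kv _ => pv_walk_eq _ _ _)
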